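-- pv_equiv track=rewrite | github.com/JRobbinsss18/Definately-Not-Statmuse | src/llm_processor.py | _extract_stat_attributes
-- ===== SOURCE A (Python) =====
-- from typing import Dict, List, Optional, Tuple
--
-- def _extract_stat_attributes(query_lower: str) -> List[str]:
--     attributes = []
--     stat_mappings = {
--         'points': 'PTS', 'ppg': 'PPG', 'points per game': 'PPG', 'scoring': 'PPG',
--         'rebounds': 'REB', 'rpg': 'RPG', 'rebounds per game': 'RPG', 'rebounding': 'RPG',
--         'assists': 'AST', 'apg': 'APG', 'assists per game': 'APG', 'playmaking': 'APG',
--         'field goal percentage': 'FG_PCT', 'field goal %': 'FG_PCT', 'fg%': 'FG_PCT',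
--         'fg percentage': 'FG_PCT', 'shooting percentage': 'FG_PCT',
--         'three point percentage': 'FG3_PCT', '3pt %': 'FG3_PCT', '3p%': 'FG3_PCT',
--         'free throw percentage': 'FT_PCT', 'ft%': 'FT_PCT',
--         'steals': 'STL', 'spg': 'STL', 'steals per game': 'STL',
--         'blocks': 'BLK', 'bpg': 'BLK', 'blocks per game': 'BLK',
--         'turnovers': 'TOV', 'tpg': 'TOV', 'turnovers per game': 'TOV',
--         'minutes': 'MIN', 'mpg': 'MIN', 'minutes per game': 'MIN'
--     }
--
--     for phrase, stat_code in stat_mappings.items():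
--         if phrase in query_lower and stat_code not in attributes:
--             attributes.append(stat_code)
--
--     return attributes
-- ===== SOURCE B (Python) =====
-- from typing import List
--
-- _CODE_PHRASES = [
--     ('PTS', ['points']),
--     ('PPG', ['ppg', 'points per game', 'scoring']),
--     ('REB', ['rebounds']),
--     ('RPG', ['rpg', 'rebounds per game', 'rebounding']),
--     ('AST', ['assists']),
--     ('APG', ['apg', 'assists per game', 'playmaking']),
--     ('FG_PCT', ['field goal percentage', 'field goal %', 'fg%', 'fg percentage', 'shooting percentage']),
--     ('FG3_PCT', ['three point percentage', '3pt %', '3p%']),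
--     ('FT_PCT', ['free throw percentage', 'ft%']),
--     ('STL', ['steals', 'spg', 'steals per game']),
--     ('BLK', ['blocks', 'bpg', 'blocks per game']),
--     ('TOV', ['turnovers', 'tpg', 'turnovers per game']),
--     ('MIN', ['minutes', 'mpg', 'minutes per game']),
-- ]
--
-- def _extract_stat_attributes(query_lower: str) -> List[str]:
--     return [code for code, phrases in _CODE_PHRASES
--             if any(p in query_lower for p in phrases)]
-- ===== Notes on version B (the rewrite author's own statement) =====
-- stated objective: idiomatic
-- what changed: Inverts the phrase-to-code dict into a code-to-phrases table (codes in their first-appearance order) and emits each code once via a comprehension with any(), so the membership dedup scan of the result list disappears.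
import Mathlib
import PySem

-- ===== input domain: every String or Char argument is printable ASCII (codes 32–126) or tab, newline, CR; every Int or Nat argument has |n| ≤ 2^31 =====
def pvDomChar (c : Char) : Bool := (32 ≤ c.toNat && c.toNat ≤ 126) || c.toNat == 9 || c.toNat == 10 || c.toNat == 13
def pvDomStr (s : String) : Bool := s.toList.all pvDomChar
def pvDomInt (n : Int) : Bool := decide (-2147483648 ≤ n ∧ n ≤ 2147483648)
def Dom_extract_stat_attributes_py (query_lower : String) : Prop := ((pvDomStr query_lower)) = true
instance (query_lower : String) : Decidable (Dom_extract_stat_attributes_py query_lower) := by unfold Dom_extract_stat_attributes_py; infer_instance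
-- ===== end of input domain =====

-- B inverts A's phrase→code dict into a code→phrases table and emits each code once via any();
-- same return value, no dedup scan (objective: idiomatic).

-- ===== PORT A =====
-- A's dict literal: all 34 keys distinct, so as an association list its items() are exactly this list in order.
def statMappings : List (String × String) := [
  ("points", "PTS"), ("ppg", "PPG"), ("points per game", "PPG"), ("scoring", "PPG"),
  ("rebounds", "REB"), ("rpg", "RPG"), ("rebounds per game", "RPG"), ("rebounding", "RPG"),
  ("assists", "AST"), ("apg", "APG"), ("assists per game", "APG"), ("playmaking", "APG"),
  ("field goal percentage", "FG_PCT"), ("field goal %", "FG_PCT"), ("fg%", "FG_PCT"),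
  ("fg percentage", "FG_PCT"), ("shooting percentage", "FG_PCT"),
  ("three point percentage", "FG3_PCT"), ("3pt %", "FG3_PCT"), ("3p%", "FG3_PCT"),
  ("free throw percentage", "FT_PCT"), ("ft%", "FT_PCT"),
  ("steals", "STL"), ("spg", "STL"), ("steals per game", "STL"),
  ("blocks", "BLK"), ("bpg", "BLK"), ("blocks per game", "BLK"),
  ("turnovers", "TOV"), ("tpg", "TOV"), ("turnovers per game", "TOV"),
  ("minutes", "MIN"), ("mpg", "MIN"), ("minutes per game", "MIN")]

def extract_stat_attributes_py (query_lower : String) : List String :=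
  statMappings.foldl
    (fun attributes pc =>
      if PySem.Str.isIn pc.1 query_lower && !(attributes.contains pc.2) then
        attributes ++ [pc.2]
      else attributes) []

-- ===== PORT B =====
def codePhrases : List (String × List String) := [
  ("PTS", ["points"]),
  ("PPG", ["ppg", "points per game", "scoring"]),
  ("REB", ["rebounds"]),
  ("RPG", ["rpg", "rebounds per game", "rebounding"]),
  ("AST", ["assists"]),
  ("APG", ["apg", "assists per game", "playmaking"]),
  ("FG_PCT", ["field goal percentage", "field goal %", "fg%", "fg percentage", "shooting percentage"]),
  ("FG3_PCT", ["three point percentage", "3pt %", "3p%"]),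
  ("FT_PCT", ["free throw percentage", "ft%"]),
  ("STL", ["steals", "spg", "steals per game"]),
  ("BLK", ["blocks", "bpg", "blocks per game"]),
  ("TOV", ["turnovers", "tpg", "turnovers per game"]),
  ("MIN", ["minutes", "mpg", "minutes per game"])]

def extract_stat_attributes_py_alt (query_lower : String) : List String :=
  codePhrases.filterMap
    (fun cp => if cp.2.any (fun p => PySem.Str.isIn p query_lower) then some cp.1 else none)

-- ===== PRECONDITION & SPEC =====
def Spec_extract_stat_attributes_py (query_lower : String) (out : List String) : Prop := out = extract_stat_attributes_py_alt query_lower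
instance (query_lower : String) (out : List String) : Decidable (Spec_extract_stat_attributes_py query_lower out) := by unfold Spec_extract_stat_attributes_py; infer_instance

-- ===== CLAIM (what is proved, stated in full; the proofs are below) =====
def Claim_equal_extract_stat_attributes_py : Prop := ∀ (query_lower : String), Dom_extract_stat_attributes_py query_lower → Spec_extract_stat_attributes_py query_lower (extract_stat_attributes_py query_lower)

-- ===== LEMMAS AND PROOFS =====

-- A's loop step
def aStep (q : String) (attributes : List String) (pc : String × String) : List String :=
  if PySem.Str.isIn pc.1 q && !(attributes.contains pc.2) then attributes ++ [pc.2] else attributes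

-- A block of phrases for a code already present leaves the accumulator unchanged.
theorem aStep_block_mem (q c : String) (ps : List String) (acc : List String)
    (h : c ∈ acc) :
    (ps.map (fun p => (p, c))).foldl (aStep q) acc = acc := by
  induction ps with
  | nil => rfl
  | cons p ps ih =>
    simp only [List.map_cons, List.foldl_cons]
    rw [show aStep q acc (p, c) = acc from by simp [aStep, h]]
    exact ih

-- A block of phrases for a fresh code appends the code iff some phrase matches.
theorem aStep_block_fresh (q c : String) (ps : List String) (acc : List String)
    (h : c ∉ acc) :
    (ps.map (fun p => (p, c))).foldl (aStep q) acc =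
      if ps.any (fun p => PySem.Str.isIn p q) then acc ++ [c] else acc := by
  induction ps with
  | nil => rfl
  | cons p ps ih =>
    simp only [List.map_cons, List.foldl_cons]
    by_cases hp : PySem.Chars.isIn p.toList q.toList = true
    · rw [show aStep q acc (p, c) = acc ++ [c] from by simp [aStep, hp, h],
        aStep_block_mem q c ps (acc ++ [c]) (by simp),
        if_pos (by simp [hp])]
    · rw [Bool.not_eq_true] at hp
      rw [show aStep q acc (p, c) = acc from by simp [aStep, hp],
        ih, show ((p :: ps).any (fun p => PySem.Str.isIn p q)) =
          (ps.any (fun p => PySem.Str.isIn p q)) from by simp [hp]]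

-- Main invariant: folding A's step over the flattened blocks equals acc ++ B's output,
-- provided no code of the remaining blocks is in acc and the codes are pairwise distinct.
theorem main_inv (q : String) (bl : List (String × List String)) (acc : List String)
    (hd : ∀ cp ∈ bl, cp.1 ∉ acc)
    (hn : (bl.map Prod.fst).Nodup) :
    (bl.flatMap (fun cp => cp.2.map (fun p => (p, cp.1)))).foldl (aStep q) acc =
      acc ++ bl.filterMap
        (fun cp => if cp.2.any (fun p => PySem.Str.isIn p q) then some cp.1 else none) := by
  induction bl generalizing acc with
  | nil => simp
  | cons cp bl ih =>
    obtain ⟨c, ps⟩ := cp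
    simp only [List.flatMap_cons, List.foldl_append, List.filterMap_cons]
    rw [aStep_block_fresh q c ps acc (hd (c, ps) List.mem_cons_self)]
    simp only [List.map_cons, List.nodup_cons] at hn
    by_cases hany : (ps.any (fun p => PySem.Str.isIn p q)) = true
    · rw [if_pos hany, if_pos hany,
        ih (acc ++ [c]) (fun dp hdp => by
          have h1 := hd dp (List.mem_cons_of_mem _ hdp)
          have h2 : dp.1 ≠ c := fun he => hn.1 (he ▸ List.mem_map_of_mem hdp)
          simp [List.mem_append, h1, h2]) hn.2]
      simp [List.append_assoc]
    · rw [if_neg hany, if_neg hany,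
        ih acc (fun dp hdp => hd dp (List.mem_cons_of_mem _ hdp)) hn.2]

-- ===== VERDICT (by name: the statement is the Claim_ definition above) =====
theorem extract_stat_attributes_py_spec : Claim_equal_extract_stat_attributes_py := by
  intro q _
  show extract_stat_attributes_py q = extract_stat_attributes_py_alt q
  unfold extract_stat_attributes_py extract_stat_attributes_py_alt
  rw [show statMappings = codePhrases.flatMap (fun cp => cp.2.map (fun p => (p, cp.1))) from rfl]
  have h := main_inv q codePhrases [] (fun cp _ => List.not_mem_nil) (by decide)
  rw [List.nil_append] at h
  exact h
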